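-- pv_equiv track=rewrite | github.com/rahilmn/snowkap-esg | backend/ontology/entity_extractor.py | _rank_matches
-- ===== SOURCE A (Python) =====
-- def _rank_matches(bindings: list[dict], query_text: str) -> dict:
--     """Rank entity matches: exact label > substring > fuzzy + edge count."""
--     query_lower = query_text.lower().strip()
--     exact = []
--     substring = []
--     fuzzy = []
--
--     for b in bindings:
--         label = b.get("label", {}).get("value", "").lower().strip()
--         edge_count = int(b.get("edge_count", {}).get("value", "0"))
--
--         if label == query_lower:
--             exact.append((b, edge_count))
--         elif query_lower in label or label in query_lower:
--             substring.append((b, edge_count))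
--         else:
--             fuzzy.append((b, edge_count))
--
--     for tier in [exact, substring, fuzzy]:
--         if tier:
--             tier.sort(key=lambda x: x[1], reverse=True)
--             return tier[0][0]
--
--     return bindings[0]
-- ===== SOURCE B (Python) =====
-- def _rank_matches(bindings: list[dict], query_text: str) -> dict:
--     """Pick the best match in one pass: max by (tier priority, edge count)."""
--     query_lower = query_text.lower().strip()
--
--     def score(b):
--         label = b.get("label", {}).get("value", "").lower().strip()
--         edge_count = int(b.get("edge_count", {}).get("value", "0"))
--         if label == query_lower:
--             priority = 3
--         elif query_lower in label or label in query_lower: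
--             priority = 2
--         else:
--             priority = 1
--         return (priority, edge_count)
--
--     return max(bindings, key=score)
-- ===== Notes on version B (the rewrite author's own statement) =====
-- stated objective: simpler
-- what changed: Replaces the three tier buckets plus a stable reverse sort of the winning bucket by a single max() pass with a lexicographic (priority, edge_count) key, relying on max returning the first maximal element to reproduce the stable tie-breaking.
import Mathlib
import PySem

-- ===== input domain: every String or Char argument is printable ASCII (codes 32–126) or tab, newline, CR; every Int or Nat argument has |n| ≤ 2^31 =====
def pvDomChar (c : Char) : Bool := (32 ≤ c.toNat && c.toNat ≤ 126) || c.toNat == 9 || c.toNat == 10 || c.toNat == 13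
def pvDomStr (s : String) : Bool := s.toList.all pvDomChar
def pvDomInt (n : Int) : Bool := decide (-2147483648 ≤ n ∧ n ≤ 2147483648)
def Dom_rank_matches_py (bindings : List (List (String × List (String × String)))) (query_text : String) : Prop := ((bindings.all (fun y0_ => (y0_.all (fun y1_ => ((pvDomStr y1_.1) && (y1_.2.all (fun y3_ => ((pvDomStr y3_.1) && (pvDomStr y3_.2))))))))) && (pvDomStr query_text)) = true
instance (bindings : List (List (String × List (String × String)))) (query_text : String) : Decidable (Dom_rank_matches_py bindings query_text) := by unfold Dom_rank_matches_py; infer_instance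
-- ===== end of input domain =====

-- B replaces A's three tier buckets + stable reverse sort of the winning bucket by a single
-- first-maximal max-scan with lexicographic key (tier priority, edge count); objective: simpler.


-- shared field accessors (both Pythons read the same dict fields the same way)
-- b.get("label", {}).get("value", "").lower().strip()
def pvLabel (b : List (String × List (String × String))) : String :=
  PySem.Str.strip (PySem.Str.lower
    (PySem.Dict.getD (PySem.Dict.mk (PySem.Dict.getD (PySem.Dict.mk b) "label" [])) "value" ""))

-- b.get("edge_count", {}).get("value", "0")
def pvEdgeStr (b : List (String × List (String × String))) : String :=
  PySem.Dict.getD (PySem.Dict.mk (PySem.Dict.getD (PySem.Dict.mk b) "edge_count" [])) "value" "0"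

-- int(...) of the above; total form, exact under Pre_ (ofStr? = none is Python's ValueError)
def pvEdge (b : List (String × List (String × String))) : Int :=
  (PySem.Int.ofStr? (pvEdgeStr b)).getD 0

-- ===== PORT A =====
-- the body of A's classification loop: append (b, edge_count) to exact / substring / fuzzy
def pvStepA (query_lower : String)
    (acc : List ((List (String × List (String × String))) × Int) ×
           List ((List (String × List (String × String))) × Int) ×
           List ((List (String × List (String × String))) × Int))
    (b : List (String × List (String × String))) :
    List ((List (String × List (String × String))) × Int) ×
    List ((List (String × List (String × String))) × Int) ×
    List ((List (String × List (String × String))) × Int) :=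
  let label := pvLabel b
  let edge_count := pvEdge b
  if label = query_lower then (acc.1 ++ [(b, edge_count)], acc.2.1, acc.2.2)
  else if PySem.Str.isIn query_lower label || PySem.Str.isIn label query_lower then
    (acc.1, acc.2.1 ++ [(b, edge_count)], acc.2.2)
  else (acc.1, acc.2.1, acc.2.2 ++ [(b, edge_count)])

def rank_matches_py (bindings : List (List (String × List (String × String)))) (query_text : String) : List (String × List (String × String)) :=
  let query_lower := PySem.Str.strip (PySem.Str.lower query_text)
  let r := bindings.foldl (pvStepA query_lower) ([], [], [])
  -- for tier in [exact, substring, fuzzy]: if tier: tier.sort(key=..., reverse=True); return tier[0][0]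
  if r.1 ≠ [] then ((PySem.List.sorted r.1 (fun x => x.2) true).headD ([], 0)).1
  else if r.2.1 ≠ [] then ((PySem.List.sorted r.2.1 (fun x => x.2) true).headD ([], 0)).1
  else if r.2.2 ≠ [] then ((PySem.List.sorted r.2.2 (fun x => x.2) true).headD ([], 0)).1
  else PySem.List.pyGetD bindings 0 []   -- bindings[0]; only reached outside Pre_

-- ===== PORT B =====
-- B's score(b) = (priority, edge_count)
def pvScore (query_lower : String) (b : List (String × List (String × String))) : Int × Int :=
  let label := pvLabel b
  let edge_count := pvEdge b
  let priority : Int :=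
    if label = query_lower then 3
    else if PySem.Str.isIn query_lower label || PySem.Str.isIn label query_lower then 2
    else 1
  (priority, edge_count)

def rank_matches_py_alt (bindings : List (List (String × List (String × String)))) (query_text : String) : List (String × List (String × String)) :=
  let query_lower := PySem.Str.strip (PySem.Str.lower query_text)
  -- max(bindings, key=score): first maximal under the lexicographic tuple key
  (PySem.List.max2? bindings (fun b => (pvScore query_lower b).1)
      (fun b => (pvScore query_lower b).2)).getD []

-- ===== PRECONDITION & SPEC =====
-- Pre_ excludes exactly the inputs where A raises: empty bindings (IndexError at bindings[0])
-- and any binding whose edge_count value string is not int()-parseable (ValueError).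
def Pre_rank_matches_py (bindings : List (List (String × List (String × String)))) (query_text : String) : Prop :=
  bindings ≠ [] ∧ ∀ b ∈ bindings, (PySem.Int.ofStr? (pvEdgeStr b)).isSome = true
instance (bindings : List (List (String × List (String × String)))) (query_text : String) : Decidable (Pre_rank_matches_py bindings query_text) := by unfold Pre_rank_matches_py; infer_instance

def pvWitness_rank_matches_py : (List (List (String × List (String × String)))) × String :=
  ([[("label", [("value", "Apple Inc")]), ("edge_count", [("value", "7")])],
    [("label", [("value", "apple")]), ("edge_count", [("value", "3")])]], "apple")

def Spec_rank_matches_py (bindings : List (List (String × List (String × String)))) (query_text : String) (out : List (String × List (String × String))) : Prop := out = rank_matches_py_alt bindings query_text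
instance (bindings : List (List (String × List (String × String)))) (query_text : String) (out : List (String × List (String × String))) : Decidable (Spec_rank_matches_py bindings query_text out) := by unfold Spec_rank_matches_py; infer_instance

-- ===== CLAIM (what is proved, stated in full; the proofs are below) =====
def Claim_equal_rank_matches_py : Prop := ∀ (bindings : List (List (String × List (String × String)))) (query_text : String), Dom_rank_matches_py bindings query_text → Pre_rank_matches_py bindings query_text → Spec_rank_matches_py bindings query_text (rank_matches_py bindings query_text)

-- ===== LEMMAS AND PROOFS =====

-- the element A would pick from the current tier state (first tier nonempty wins, first max edge inside)
def pvSel (acc : List ((List (String × List (String × String))) × Int) ×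
               List ((List (String × List (String × String))) × Int) ×
               List ((List (String × List (String × String))) × Int)) :
    Option (List (String × List (String × String))) :=
  match PySem.List.max? acc.1 (fun p => p.2) with
  | some m => some m.1
  | none =>
    match PySem.List.max? acc.2.1 (fun p => p.2) with
    | some m => some m.1
    | none => (PySem.List.max? acc.2.2 (fun p => p.2)).map (fun p => p.1)

-- every pair stored in a tier carries its binding's edge count, and sits in its priority tier
def pvInv (q : String)
    (acc : List ((List (String × List (String × String))) × Int) ×
           List ((List (String × List (String × String))) × Int) ×
           List ((List (String × List (String × String))) × Int)) : Prop :=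
  (∀ p ∈ acc.1, p.2 = pvEdge p.1 ∧ (pvScore q p.1).1 = 3) ∧
  (∀ p ∈ acc.2.1, p.2 = pvEdge p.1 ∧ (pvScore q p.1).1 = 2) ∧
  (∀ p ∈ acc.2.2, p.2 = pvEdge p.1 ∧ (pvScore q p.1).1 = 1)

-- the fold step of B's max2?
def pvStepB (q : String) (m : Option (List (String × List (String × String))))
    (x : List (String × List (String × String))) : Option (List (String × List (String × String))) :=
  match m with
  | none => some x
  | some m =>
    if (decide ((pvScore q m).1 < (pvScore q x).1) ||
        (!decide ((pvScore q x).1 < (pvScore q m).1) && decide ((pvScore q m).2 < (pvScore q x).2))) = true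
    then some x else some m

theorem max2?_eq_foldl (q : String) (xs : List (List (String × List (String × String)))) :
    PySem.List.max2? xs (fun b => (pvScore q b).1) (fun b => (pvScore q b).2) =
      xs.foldl (pvStepB q) none := by
  simp only [PySem.List.max2?]
  congr 1
  funext acc x
  cases acc <;> rfl

theorem score2 (q : String) (b : List (String × List (String × String))) :
    (pvScore q b).2 = pvEdge b := rfl

theorem max?_nil {α : Type} (key : α → Int) :
    PySem.List.max? ([] : List α) key = none := rfl

theorem max?_singleton {α : Type} (y : α) (key : α → Int) :
    PySem.List.max? [y] key = some y := rfl

theorem max?_append_singleton {α : Type} (t : List α) (y : α) (key : α → Int) :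
    PySem.List.max? (t ++ [y]) key =
      match PySem.List.max? t key with
      | none => some y
      | some m => if key m < key y then some y else some m := by
  simp only [PySem.List.max?, List.foldl_append]
  rfl

theorem head?_insertBy {α : Type} (key : α → Int) (x : α) (acc : List α) :
    (PySem.List.insertBy (fun a b => decide (key b < key a)) x acc).head? =
      match acc.head? with
      | none => some x
      | some y => if key y < key x then some x else some y := by
  cases acc with
  | nil => simp [PySem.List.insertBy]
  | cons y ys =>
    simp only [PySem.List.insertBy, List.head?]
    by_cases h : key y < key x <;> simp [h]

theorem head?_foldl_insertBy {α : Type} (key : α → Int) :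
    ∀ (xs acc : List α),
      (xs.foldl (fun a x => PySem.List.insertBy (fun a b => decide (key b < key a)) x a) acc).head? =
        xs.foldl (fun (m : Option α) x =>
          match m with
          | none => some x
          | some m => if key m < key x then some x else some m) acc.head? := by
  intro xs
  induction xs with
  | nil => intro acc; rfl
  | cons x t ih =>
    intro acc
    simp only [List.foldl_cons]
    rw [ih, head?_insertBy]

theorem head?_sorted_rev {α : Type} (xs : List α) (key : α → Int) :
    (PySem.List.sorted xs key true).head? = PySem.List.max? xs key := by
  simp only [PySem.List.sorted, PySem.List.max?]
  simpa using head?_foldl_insertBy key xs []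

theorem pv_step (q : String) (acc) (x) (h : pvInv q acc) :
    pvInv q (pvStepA q acc x) ∧ pvSel (pvStepA q acc x) = pvStepB q (pvSel acc) x := by
  obtain ⟨he, hs, hf⟩ := h
  have hx2 : (pvScore q x).2 = pvEdge x := rfl
  by_cases h3 : pvLabel x = q
  · -- exact tier
    have hx1 : (pvScore q x).1 = 3 := by simp [pvScore, h3]
    have hstep : pvStepA q acc x = (acc.1 ++ [(x, pvEdge x)], acc.2.1, acc.2.2) := by
      simp [pvStepA, h3]
    rw [hstep]
    refine ⟨⟨?_, hs, hf⟩, ?_⟩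
    · intro p hp
      rcases List.mem_append.mp hp with hp | hp
      · exact he p hp
      · simp only [List.mem_singleton] at hp; subst hp; exact ⟨rfl, hx1⟩
    · rcases hE : PySem.List.max? acc.1 (fun p => p.2) with _ | m
      · have heq : acc.1 = [] := (PySem.List.max?_eq_none_iff _ _).mp hE
        rcases hS : PySem.List.max? acc.2.1 (fun p => p.2) with _ | ms
        · rcases hF : PySem.List.max? acc.2.2 (fun p => p.2) with _ | mf
          · simp [pvSel, hE, hS, hF, heq, max?_append_singleton, pvStepB, max?_singleton, max?_nil, max?_nil]
          · have hmf := hf mf (PySem.List.max?_mem hF)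
            simp [pvSel, hE, hS, hF, heq, max?_append_singleton, pvStepB, max?_singleton, max?_nil,
              hx1, hmf.2]
        · have hms := hs ms (PySem.List.max?_mem hS)
          simp [pvSel, hE, hS, heq, max?_append_singleton, pvStepB, max?_singleton, max?_nil, hx1, hms.2]
      · have hm := he m (PySem.List.max?_mem hE)
        by_cases hlt : m.2 < pvEdge x
        · simp [pvSel, hE, max?_append_singleton, pvStepB, hx1, hx2, score2, hm.2, ← hm.1, hlt]
        · simp [pvSel, hE, max?_append_singleton, pvStepB, hx1, hx2, score2, hm.2, ← hm.1, hlt]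
  · by_cases h2 : (PySem.Str.isIn q (pvLabel x) || PySem.Str.isIn (pvLabel x) q) = true
    · -- substring tier
      have hx1 : (pvScore q x).1 = 2 := by
        simp only [pvScore]; rw [if_neg h3, if_pos h2]
      have hstep : pvStepA q acc x = (acc.1, acc.2.1 ++ [(x, pvEdge x)], acc.2.2) := by
        simp only [pvStepA]; rw [if_neg h3, if_pos h2]
      rw [hstep]
      refine ⟨⟨he, ?_, hf⟩, ?_⟩
      · intro p hp
        rcases List.mem_append.mp hp with hp | hp
        · exact hs p hp
        · simp only [List.mem_singleton] at hp; subst hp; exact ⟨rfl, hx1⟩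
      · rcases hE : PySem.List.max? acc.1 (fun p => p.2) with _ | m
        · rcases hS : PySem.List.max? acc.2.1 (fun p => p.2) with _ | ms
          · have heq : acc.2.1 = [] := (PySem.List.max?_eq_none_iff _ _).mp hS
            rcases hF : PySem.List.max? acc.2.2 (fun p => p.2) with _ | mf
            · simp [pvSel, hE, hS, hF, heq, max?_append_singleton, pvStepB, max?_singleton, max?_nil, max?_nil]
            · have hmf := hf mf (PySem.List.max?_mem hF)
              simp [pvSel, hE, hS, hF, heq, max?_append_singleton, pvStepB, max?_singleton, max?_nil,
                hx1, hmf.2]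
          · have hms := hs ms (PySem.List.max?_mem hS)
            by_cases hlt : ms.2 < pvEdge x
            · simp [pvSel, hE, hS, max?_append_singleton, pvStepB, hx1, hx2, score2, hms.2, ← hms.1, hlt]
            · simp [pvSel, hE, hS, max?_append_singleton, pvStepB, hx1, hx2, score2, hms.2, ← hms.1, hlt]
        · have hm := he m (PySem.List.max?_mem hE)
          simp [pvSel, hE, pvStepB, hx1, hm.2]
    · -- fuzzy tier
      have hx1 : (pvScore q x).1 = 1 := by
        simp only [pvScore]; rw [if_neg h3, if_neg h2]
      have hstep : pvStepA q acc x = (acc.1, acc.2.1, acc.2.2 ++ [(x, pvEdge x)]) := by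
        simp only [pvStepA]; rw [if_neg h3, if_neg h2]
      rw [hstep]
      refine ⟨⟨he, hs, ?_⟩, ?_⟩
      · intro p hp
        rcases List.mem_append.mp hp with hp | hp
        · exact hf p hp
        · simp only [List.mem_singleton] at hp; subst hp; exact ⟨rfl, hx1⟩
      · rcases hE : PySem.List.max? acc.1 (fun p => p.2) with _ | m
        · rcases hS : PySem.List.max? acc.2.1 (fun p => p.2) with _ | ms
          · rcases hF : PySem.List.max? acc.2.2 (fun p => p.2) with _ | mf
            · have heq : acc.2.2 = [] := (PySem.List.max?_eq_none_iff _ _).mp hF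
              simp [pvSel, hE, hS, hF, heq, max?_append_singleton, pvStepB, max?_singleton, max?_nil, max?_nil]
            · have hmf := hf mf (PySem.List.max?_mem hF)
              by_cases hlt : mf.2 < pvEdge x
              · simp [pvSel, hE, hS, hF, max?_append_singleton, pvStepB, hx1, hx2, score2, hmf.2,
                  ← hmf.1, hlt]
              · simp [pvSel, hE, hS, hF, max?_append_singleton, pvStepB, hx1, hx2, score2, hmf.2,
                  ← hmf.1, hlt]
          · have hms := hs ms (PySem.List.max?_mem hS)
            simp [pvSel, hE, hS, pvStepB, hx1, hms.2]
        · have hm := he m (PySem.List.max?_mem hE)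
          simp [pvSel, hE, pvStepB, hx1, hm.2]

theorem pv_fold (q : String) (bs : List (List (String × List (String × String)))) :
    ∀ acc, pvInv q acc →
      pvInv q (bs.foldl (pvStepA q) acc) ∧
      pvSel (bs.foldl (pvStepA q) acc) = bs.foldl (pvStepB q) (pvSel acc) := by
  induction bs with
  | nil => intro acc h; exact ⟨h, rfl⟩
  | cons x t ih =>
    intro acc h
    have hs := pv_step q acc x h
    simp only [List.foldl_cons]
    obtain ⟨h1, h2⟩ := ih (pvStepA q acc x) hs.1
    exact ⟨h1, by rw [h2, hs.2]⟩

theorem foldl_stepB_some (q : String) :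
    ∀ (t : List (List (String × List (String × String)))) (m),
      (t.foldl (pvStepB q) (some m)).isSome = true := by
  intro t
  induction t with
  | nil => intro m; rfl
  | cons x t ih =>
    intro m
    simp only [List.foldl_cons, pvStepB]
    split <;> exact ih _

-- ===== VERDICT (by name: the statement is the Claim_ definition above) =====
theorem rank_matches_py_spec : Claim_equal_rank_matches_py := by
  intro bindings query_text _ hpre
  obtain ⟨hne, _⟩ := hpre
  unfold Spec_rank_matches_py rank_matches_py rank_matches_py_alt
  simp only [ne_eq, max2?_eq_foldl]
  obtain ⟨hinv, hsel⟩ := pv_fold (PySem.Str.strip (PySem.Str.lower query_text)) bindings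
    ([], [], []) (by refine ⟨?_, ?_, ?_⟩ <;> (intro p hp; simp at hp))
  have hsome : (bindings.foldl (pvStepB (PySem.Str.strip (PySem.Str.lower query_text))) none).isSome = true := by
    cases bindings with
    | nil => exact absurd rfl hne
    | cons b t =>
      simpa only [List.foldl_cons] using foldl_stepB_some (PySem.Str.strip (PySem.Str.lower query_text)) t b
  obtain ⟨w, hw⟩ := Option.isSome_iff_exists.mp hsome
  rw [show pvSel ([], [], []) = (none : Option (List (String × List (String × String)))) from rfl,
    hw] at hsel
  rw [hw]
  set q := PySem.Str.strip (PySem.Str.lower query_text) with hq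
  set r := List.foldl (pvStepA q) ([], [], []) bindings with hr
  rcases hE : PySem.List.max? r.1 (fun p => p.2) with _ | m
  · have hr1 : r.1 = [] := (PySem.List.max?_eq_none_iff _ _).mp hE
    rw [if_neg (not_not_intro hr1)]
    rcases hS : PySem.List.max? r.2.1 (fun p => p.2) with _ | m
    · have hr2 : r.2.1 = [] := (PySem.List.max?_eq_none_iff _ _).mp hS
      rw [if_neg (not_not_intro hr2)]
      rcases hF : PySem.List.max? r.2.2 (fun p => p.2) with _ | m
      · simp [pvSel, hE, hS, hF] at hsel
      · have hr3 : r.2.2 ≠ [] := by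
          intro h; rw [h, max?_nil] at hF; simp at hF
        rw [if_pos hr3]
        have hh : (PySem.List.sorted r.2.2 (fun x => x.2) true).head? = some m := by
          rw [head?_sorted_rev, hF]
        rw [List.headD_eq_head?_getD, hh]
        simp [pvSel, hE, hS, hF] at hsel
        simp [hsel]
    · have hr2 : r.2.1 ≠ [] := by
        intro h; rw [h, max?_nil] at hS; simp at hS
      rw [if_pos hr2]
      have hh : (PySem.List.sorted r.2.1 (fun x => x.2) true).head? = some m := by
        rw [head?_sorted_rev, hS]
      rw [List.headD_eq_head?_getD, hh]
      simp [pvSel, hE, hS] at hsel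
      simp [hsel]
  · have hr1 : r.1 ≠ [] := by
      intro h; rw [h, max?_nil] at hE; simp at hE
    rw [if_pos hr1]
    have hh : (PySem.List.sorted r.1 (fun x => x.2) true).head? = some m := by
      rw [head?_sorted_rev, hE]
    rw [List.headD_eq_head?_getD, hh]
    simp [pvSel, hE] at hsel
    simp [hsel]
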